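-- pv_equiv track=rewrite | github.com/wintermute-cell/aoc | aoc23/day12-pls-no-elixir/main.py | count_arrangements
-- ===== SOURCE A (Python) =====
-- from itertools import combinations
--
-- def count_slots(s):
--     """
--     Count the number of slots (sequences of '?' or '#') in the string.
--     """
--     slots = []
--     in_slot = False
--     start = 0
--
--     for i, char in enumerate(s):
--         if char in '?#' and not in_slot:
--             in_slot = True
--             start = i
--         elif char not in '?#' and in_slot:
--             slots.append((start, i - 1))
--             in_slot = False
--
--     if in_slot:
--         slots.append((start, len(s) - 1))
--
--     return slots
--
-- def count_arrangements(s, groups):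
--     slots = count_slots(s)
--     total_ways = 0
--
--     for slot_indices in combinations(range(len(slots)), len(groups)):
--         ways = 1
--         for group, slot_index in zip(groups, slot_indices):
--             slot = slots[slot_index]
--             slot_length = slot[1] - slot[0] + 1
--             if group <= slot_length:
--                 # Number of ways to place the group in the slot
--                 ways *= (slot_length - group + 1)
--             else:
--                 ways = 0
--                 break
--         total_ways += ways
--
--     return total_ways
-- ===== SOURCE B (Python) =====
-- def count_arrangements(s, groups):
--     # One left-to-right DP over slot lengths instead of enumerating combinations:
--     # dp[g] = weighted number of ways to place the first g groups, in order, into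
--     # distinct slots among those processed so far.
--     lens = []
--     cur = 0
--     for c in s:
--         if c in '?#':
--             cur += 1
--         else:
--             if cur:
--                 lens.append(cur)
--             cur = 0
--     if cur:
--         lens.append(cur)
--
--     k = len(groups)
--     dp = [1] + [0] * k
--     for L in lens:
--         dp = [dp[0]] + [hi + lo * ((L - g + 1) if g <= L else 0)
--                         for (lo, hi), g in zip(zip(dp, dp[1:]), groups)]
--     return dp[k]
-- ===== Notes on version B (the rewrite author's own statement) =====
-- stated objective: alternative
-- what changed: Replaces the enumeration of all C(n_slots, k) index combinations (each re-scored by an inner loop) with a single left-to-right DP over slot lengths keeping dp[g] = weighted ways to place the first g groups, so dp'[g] = dp[g] + dp[g-1]*place_factor.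
import Mathlib
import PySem

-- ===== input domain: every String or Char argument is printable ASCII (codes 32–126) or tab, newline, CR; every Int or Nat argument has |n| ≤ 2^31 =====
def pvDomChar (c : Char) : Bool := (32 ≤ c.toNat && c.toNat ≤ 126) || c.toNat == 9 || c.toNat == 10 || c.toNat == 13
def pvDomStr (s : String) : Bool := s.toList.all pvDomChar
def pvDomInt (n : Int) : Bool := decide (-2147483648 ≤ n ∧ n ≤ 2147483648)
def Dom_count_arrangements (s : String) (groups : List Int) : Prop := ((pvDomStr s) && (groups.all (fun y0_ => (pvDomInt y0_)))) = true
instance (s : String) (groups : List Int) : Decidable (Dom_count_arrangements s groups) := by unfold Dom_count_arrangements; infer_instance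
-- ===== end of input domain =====

-- B replaces A's enumeration of all slot-index combinations by a single left-to-right DP
-- over slot lengths (objective: alternative — a genuinely different algorithm, same value).

-- ===== PORT A =====
-- one step of count_slots' enumerate loop; state = (slots, in_slot, start)
def csStep (st : List (Int × Int) × Bool × Int) (p : Int × Char) : List (Int × Int) × Bool × Int :=
  if (p.2 == '?' || p.2 == '#') && !st.2.1 then (st.1, true, p.1)
  else if !(p.2 == '?' || p.2 == '#') && st.2.1 then (st.1 ++ [(st.2.2, p.1 - 1)], false, st.2.2)
  else st

def count_slots (s : String) : List (Int × Int) :=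
  let st := (PySem.List.enumerate s.toList 0).foldl csStep ([], false, 0)
  if st.2.1 then st.1 ++ [(st.2.2, (s.toList.length : Int) - 1)] else st.1

-- the inner 'for group, slot_index in zip(groups, slot_indices)' loop with its break
def aWays (slots : List (Int × Int)) : List (Int × Int) → Int → Int
  | [], ways => ways
  | (group, slotIndex) :: rest, ways =>
    -- slots[slot_index]: the index comes from combinations(range(len(slots))), always in range
    let slot := PySem.List.pyGetD slots slotIndex ((0 : Int), (0 : Int))
    let slotLength := slot.2 - slot.1 + 1
    if group ≤ slotLength then aWays slots rest (ways * (slotLength - group + 1)) else 0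

def count_arrangements (s : String) (groups : List Int) : Int :=
  let slots := count_slots s
  (PySem.List.combinations (PySem.List.pyRange 0 (slots.length : Int) 1) groups.length).foldl
    (fun total_ways c => total_ways + aWays slots (List.zip groups c) 1) 0

-- ===== PORT B =====
-- one step of the slot-length scan; state = (lens, cur)
def slStep (st : List Int × Int) (c : Char) : List Int × Int :=
  if c == '?' || c == '#' then (st.1, st.2 + 1)
  else if st.2 != 0 then (st.1 ++ [st.2], 0)
  else (st.1, 0)

def slot_lens (s : String) : List Int :=
  let st := s.toList.foldl slStep ([], 0)
  if st.2 != 0 then st.1 ++ [st.2] else st.1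

-- dp' = [dp[0]] + [hi + lo*factor for (lo, hi), g in zip(zip(dp, dp[1:]), groups)]
def bStep (groups : List Int) (dp : List Int) (L : Int) : List Int :=
  dp.headD 0 ::  -- dp[0]; dp is always nonempty
    (List.zip (List.zip dp (PySem.List.slice dp (some 1) none)) groups).map
      (fun pg => pg.1.2 + pg.1.1 * (if pg.2 ≤ L then L - pg.2 + 1 else 0))

def count_arrangements_alt (s : String) (groups : List Int) : Int :=
  let dp := (slot_lens s).foldl (bStep groups) (1 :: List.replicate groups.length 0)
  PySem.List.pyGetD dp (groups.length : Int) 0  -- dp[k]; dp has length k+1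

-- ===== PRECONDITION & SPEC =====
def Spec_count_arrangements (s : String) (groups : List Int) (out : Int) : Prop := out = count_arrangements_alt s groups
instance (s : String) (groups : List Int) (out : Int) : Decidable (Spec_count_arrangements s groups out) := by unfold Spec_count_arrangements; infer_instance

-- ===== CLAIM (what is proved, stated in full; the proofs are below) =====
def Claim_equal_count_arrangements : Prop := ∀ (s : String) (groups : List Int), Dom_count_arrangements s groups → Spec_count_arrangements s groups (count_arrangements s groups)

-- ===== LEMMAS AND PROOFS =====

-- length of a slot (start, end)
def lenOf (p : Int × Int) : Int := p.2 - p.1 + 1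
-- weight of placing group g in a slot of length L
def fct (g L : Int) : Int := if g ≤ L then L - g + 1 else 0
-- product of placement weights, pairing groups with chosen slot lengths
def prodF : List Int → List Int → Int
  | g :: gs, L :: Ls => fct g L * prodF gs Ls
  | _, _ => 1
-- the common mathematical value: total weighted ways to place gs into distinct slots of P, in order
def Wsum (gs P : List Int) : Int := ((PySem.List.combinations P gs.length).map (prodF gs)).sum
-- B's dp row after processing slot lengths P: entry j is Wsum (first j groups) P
def rowFrom : List Int → List Int → List Int → List Int
  | pre, [], P => [Wsum pre P]
  | pre, g :: gs, P => Wsum pre P :: rowFrom (pre ++ [g]) gs P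

theorem prodF_nil_left (Ls : List Int) : prodF [] Ls = 1 := by cases Ls <;> rfl

theorem prodF_snoc (g L : Int) : ∀ (gs c : List Int), c.length = gs.length →
    prodF (gs ++ [g]) (c ++ [L]) = prodF gs c * fct g L := by
  intro gs
  induction gs with
  | nil => intro c hc; simp at hc; subst hc; simp [prodF]
  | cons g' gs ih =>
    intro c hc
    cases c with
    | nil => simp at hc
    | cons x xs =>
      simp at hc
      simp [prodF, ih xs hc, mul_assoc]

theorem perm_swap_mid {α : Type} (A B C D : List α) :
    ((A ++ B) ++ (C ++ D)).Perm ((A ++ C) ++ (B ++ D)) := by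
  simp only [List.append_assoc]
  exact List.Perm.append_left A (List.perm_append_comm_assoc B C D)

theorem comb_snoc_perm {α : Type} (L : α) : ∀ (P : List α) (r : Nat),
    (PySem.List.combinations (P ++ [L]) (r + 1)).Perm
      (PySem.List.combinations P (r + 1) ++
        (PySem.List.combinations P r).map (fun c => c ++ [L])) := by
  intro P
  induction P with
  | nil =>
    intro r
    cases r with
    | zero =>
      exact List.Perm.of_eq (by
        simp [PySem.List.combinations_one, PySem.List.combinations_zero])
    | succ r =>
      exact List.Perm.of_eq (by
        rw [List.nil_append, PySem.List.combinations_eq_nil_of_length_lt _ (by simp)]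
        simp [PySem.List.combinations_nil_succ])
  | cons x P ih =>
    intro r
    cases r with
    | zero =>
      exact List.Perm.of_eq (by simp [PySem.List.combinations_one])
    | succ r =>
      rw [List.cons_append, PySem.List.combinations_cons_succ]
      refine List.Perm.trans (List.Perm.append ((ih r).map _) (ih (r + 1))) ?_
      rw [PySem.List.combinations_cons_succ (r := r), PySem.List.combinations_cons_succ (r := r + 1)]
      simp only [List.map_append, List.map_map]
      have hcomp : ((fun c => x :: c) ∘ fun c => c ++ [L])
          = ((fun c => c ++ [L]) ∘ (fun c => x :: c) : List α → List α) := by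
        funext c; simp
      rw [hcomp]
      exact perm_swap_mid _ _ _ _

theorem Wsum_nil (P : List Int) : Wsum [] P = 1 := by
  simp [Wsum, PySem.List.combinations_zero, prodF_nil_left]

theorem Wsum_snoc (gs : List Int) (g : Int) (P : List Int) (L : Int) :
    Wsum (gs ++ [g]) (P ++ [L]) = Wsum (gs ++ [g]) P + Wsum gs P * fct g L := by
  unfold Wsum
  simp only [List.length_append, List.length_cons, List.length_nil]
  rw [((comb_snoc_perm L P gs.length).map (prodF (gs ++ [g]))).sum_eq]
  rw [List.map_append, List.sum_append, List.map_map]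
  congr 1
  rw [List.map_congr_left (g := fun c => prodF gs c * fct g L) (fun c hc => by
        have h := (PySem.List.mem_combinations_iff P gs.length c).1 hc
        simpa using prodF_snoc g L gs c h.2)]
  rw [List.sum_map_mul_right]

theorem Wsum_empty_slots (pre : List Int) (h : pre ≠ []) : Wsum pre [] = 0 := by
  cases pre with
  | nil => exact absurd rfl h
  | cons a l => simp [Wsum, PySem.List.combinations_nil_succ]

theorem rowFrom_ne_nil_slots : ∀ (gs pre : List Int), pre ≠ [] →
    rowFrom pre gs [] = List.replicate (gs.length + 1) 0 := by
  intro gs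
  induction gs with
  | nil => intro pre h; simp [rowFrom, Wsum_empty_slots pre h, List.replicate]
  | cons g gs ih =>
    intro pre h
    simp [rowFrom, Wsum_empty_slots pre h, List.replicate_succ, ih (pre ++ [g]) (by simp)]

theorem rowFrom_nil_slots (gs : List Int) : rowFrom [] gs [] = 1 :: List.replicate gs.length 0 := by
  cases gs with
  | nil => simp [rowFrom, Wsum_nil, List.replicate]
  | cons g gs => simp [rowFrom, Wsum_nil, rowFrom_ne_nil_slots gs [g] (by simp)]

theorem rowFrom_head (pre gs P) : (rowFrom pre gs P).headD 0 = Wsum pre P := by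
  cases gs <;> rfl

theorem rowFrom_eq_cons (pre gs P) :
    rowFrom pre gs P = Wsum pre P :: (rowFrom pre gs P).tail := by
  cases gs <;> rfl

theorem bStep_tail (L : Int) : ∀ (gs pre P : List Int),
    (List.zip (List.zip (rowFrom pre gs P) (rowFrom pre gs P).tail) gs).map
      (fun pg => pg.1.2 + pg.1.1 * (if pg.2 ≤ L then L - pg.2 + 1 else 0))
    = (rowFrom pre gs (P ++ [L])).tail := by
  intro gs
  induction gs with
  | nil => intro pre P; simp [rowFrom]
  | cons g gs ih =>
    intro pre P
    cases gs with
    | nil =>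
      simp only [rowFrom, List.tail_cons, List.zip_cons_cons, List.zip_nil_right,
        List.map_cons, List.map_nil]
      rw [Wsum_snoc pre g P L]
      simp [fct]
    | cons g2 gs2 =>
      have ih' := ih (pre ++ [g]) P
      simp only [rowFrom, List.tail_cons, List.zip_cons_cons, List.map_cons] at ih' ⊢
      rw [Wsum_snoc pre g P L]
      simp only [fct]
      exact congrArg (List.cons _) ih'

theorem bStep_rowFrom (gs P : List Int) (L : Int) :
    bStep gs (rowFrom [] gs P) L = rowFrom [] gs (P ++ [L]) := by
  unfold bStep
  rw [PySem.List.slice_from_one, bStep_tail L gs [] P, rowFrom_head]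
  conv_rhs => rw [rowFrom_eq_cons]
  rw [Wsum_nil, Wsum_nil]

theorem foldl_bStep (gs : List Int) : ∀ (lens P : List Int),
    lens.foldl (bStep gs) (rowFrom [] gs P) = rowFrom [] gs (P ++ lens) := by
  intro lens
  induction lens with
  | nil => intro P; simp
  | cons L lens ih =>
    intro P
    simp only [List.foldl_cons, bStep_rowFrom, ih]
    simp

theorem rowFrom_getD : ∀ (gs pre P : List Int),
    (rowFrom pre gs P).getD gs.length 0 = Wsum (pre ++ gs) P := by
  intro gs
  induction gs with
  | nil => intro pre P; simp [rowFrom]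
  | cons g gs ih =>
    intro pre P
    rw [show rowFrom pre (g :: gs) P = Wsum pre P :: rowFrom (pre ++ [g]) gs P from rfl]
    simp only [List.length_cons, List.getD_cons_succ]
    rw [ih (pre ++ [g]) P]
    simp

theorem B_eq (s : String) (groups : List Int) :
    count_arrangements_alt s groups = Wsum groups (slot_lens s) := by
  unfold count_arrangements_alt
  rw [show (1 : Int) :: List.replicate groups.length 0 = rowFrom [] groups [] from
    (rowFrom_nil_slots groups).symm]
  rw [foldl_bStep, List.nil_append, PySem.List.pyGetD_natCast, rowFrom_getD, List.nil_append]

-- ===== A side =====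

theorem aWays_cons (slots : List (Int × Int)) (g idx : Int) (rest : List (Int × Int)) (w : Int) :
    aWays slots ((g, idx) :: rest) w =
      (if g ≤ (PySem.List.pyGetD slots idx ((0 : Int), (0 : Int))).2
              - (PySem.List.pyGetD slots idx ((0 : Int), (0 : Int))).1 + 1
       then aWays slots rest
              (w * ((PySem.List.pyGetD slots idx ((0 : Int), (0 : Int))).2
                    - (PySem.List.pyGetD slots idx ((0 : Int), (0 : Int))).1 + 1 - g + 1))
       else 0) := rfl

theorem prodF_cons (g L : Int) (gs Ls : List Int) :
    prodF (g :: gs) (L :: Ls) = fct g L * prodF gs Ls := rfl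

theorem aWays_eq (slots : List (Int × Int)) : ∀ (gs : List Int) (c : List Nat) (w : Int),
    aWays slots (List.zip gs (c.map (fun k => ((k : Nat) : Int)))) w
      = w * prodF gs (c.map (fun i => lenOf (slots.getD i (0, 0)))) := by
  intro gs
  induction gs with
  | nil => intro c w; simp [aWays, prodF_nil_left]
  | cons g gs ih =>
    intro c w
    cases c with
    | nil =>
      simp only [List.map_nil, List.zip_nil_right]
      rw [show prodF (g :: gs) [] = 1 from rfl, mul_one]
      rfl
    | cons i c =>
      rw [List.map_cons, List.zip_cons_cons, aWays_cons, PySem.List.pyGetD_natCast,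
        List.map_cons, prodF_cons]
      by_cases hg : g ≤ (slots.getD i (0, 0)).2 - (slots.getD i (0, 0)).1 + 1
      · rw [if_pos hg, ih c _]
        simp only [fct, lenOf]
        rw [if_pos hg]; ring
      · rw [if_neg hg]
        simp only [fct, lenOf]
        rw [if_neg hg]; ring

theorem map_getD_range {α : Type} (xs : List α) (d : α) :
    (List.range xs.length).map (fun i => xs.getD i d) = xs := by
  apply List.ext_getElem
  · simp
  · intro i h1 h2
    simp only [List.getElem_map, List.getElem_range, List.getD]
    rw [List.getElem?_eq_getElem h2]
    rfl

theorem A_eq (s : String) (groups : List Int) :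
    count_arrangements s groups = Wsum groups ((count_slots s).map lenOf) := by
  simp only [count_arrangements]
  set slots := count_slots s with hs
  rw [PySem.List.foldl_add _ (fun c => aWays slots (List.zip groups c) 1), zero_add]
  rw [PySem.List.pyRange_zero_nat slots.length, PySem.List.combinations_map, List.map_map]
  rw [List.map_congr_left
    (g := fun c => prodF groups (c.map (fun i => lenOf (slots.getD i (0, 0)))))
    (fun c _ => by
      simp only [Function.comp]
      rw [aWays_eq slots groups c 1, one_mul])]
  unfold Wsum
  have hmap : (List.range slots.length).map (fun i => lenOf (slots.getD i (0, 0)))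
      = slots.map lenOf := by
    conv_rhs => rw [← map_getD_range slots (0, 0)]
    rw [List.map_map]
    rfl
  rw [← hmap, PySem.List.combinations_map, List.map_map]
  rfl

-- ===== scan relation: slot_lens s = (count_slots s).map lenOf =====

theorem scan_rel : ∀ (cs : List Char) (i start : Int) (slots : List (Int × Int)) (cur : Int)
    (inSlot : Bool),
    (if inSlot then 0 < cur ∧ start = i - cur else cur = 0) →
    ((cs.foldl slStep (slots.map lenOf, cur)).1
        = ((PySem.List.enumerate cs i).foldl csStep (slots, inSlot, start)).1.map lenOf
      ∧ (if ((PySem.List.enumerate cs i).foldl csStep (slots, inSlot, start)).2.1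
         then 0 < (cs.foldl slStep (slots.map lenOf, cur)).2
           ∧ ((PySem.List.enumerate cs i).foldl csStep (slots, inSlot, start)).2.2
             = (i + cs.length) - (cs.foldl slStep (slots.map lenOf, cur)).2
         else (cs.foldl slStep (slots.map lenOf, cur)).2 = 0)) := by
  intro cs
  induction cs with
  | nil =>
    intro i start slots cur inSlot h
    simpa [PySem.List.enumerate_nil] using h
  | cons c cs ih =>
    intro i start slots cur inSlot h
    rw [PySem.List.enumerate_cons]
    simp only [List.foldl_cons]
    by_cases hc : (c == '?' || c == '#') = true
    · cases inSlot with
      | false =>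
        simp only [if_neg Bool.false_ne_true] at h
        rw [show csStep (slots, false, start) (i, c) = (slots, true, i) by
              simp [csStep, hc],
            show slStep (slots.map lenOf, cur) c = (slots.map lenOf, cur + 1) by
              simp [slStep, hc]]
        have := ih (i + 1) i slots (cur + 1) true (by
          rw [if_pos rfl]; constructor <;> omega)
        simp only [List.length_cons] at this ⊢
        convert this using 3 <;> push_cast <;> ring_nf
      | true =>
        rw [if_pos rfl] at h
        rw [show csStep (slots, true, start) (i, c) = (slots, true, start) by
              simp [csStep, hc],
            show slStep (slots.map lenOf, cur) c = (slots.map lenOf, cur + 1) by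
              simp [slStep, hc]]
        have := ih (i + 1) start slots (cur + 1) true (by
          rw [if_pos rfl]; constructor <;> omega)
        simp only [List.length_cons] at this ⊢
        convert this using 3 <;> push_cast <;> ring_nf
    · cases inSlot with
      | false =>
        simp only [if_neg Bool.false_ne_true] at h
        rw [show csStep (slots, false, start) (i, c) = (slots, false, start) by
              simp [csStep, hc],
            show slStep (slots.map lenOf, cur) c = (slots.map lenOf, cur) by
              simp [slStep, hc, h]]
        have := ih (i + 1) start slots cur false (by rw [if_neg Bool.false_ne_true]; exact h)
        simp only [List.length_cons] at this ⊢
        convert this using 3 <;> push_cast <;> ring_nf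
      | true =>
        rw [if_pos rfl] at h
        obtain ⟨hpos, hst⟩ := h
        rw [show csStep (slots, true, start) (i, c) = (slots ++ [(start, i - 1)], false, start) by
              simp [csStep, hc],
            show slStep (slots.map lenOf, cur) c = (slots.map lenOf ++ [cur], 0) by
              simp [slStep, hc]; omega]
        have hlen : slots.map lenOf ++ [cur] = (slots ++ [(start, i - 1)]).map lenOf := by
          rw [List.map_append]
          simp only [List.map_cons, List.map_nil, lenOf]
          congr 2
          omega
        rw [hlen]
        have := ih (i + 1) start (slots ++ [(start, i - 1)]) 0 false
          (by rw [if_neg Bool.false_ne_true])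
        simp only [List.length_cons] at this ⊢
        convert this using 3 <;> push_cast <;> ring_nf

theorem lens_eq (s : String) : slot_lens s = (count_slots s).map lenOf := by
  have h := scan_rel s.toList 0 0 [] 0 false (by rw [if_neg Bool.false_ne_true])
  simp only [List.map_nil] at h
  obtain ⟨h1, h2⟩ := h
  simp only [slot_lens, count_slots]
  by_cases hin : ((PySem.List.enumerate s.toList 0).foldl csStep ([], false, 0)).2.1 = true
  · rw [if_pos hin] at h2
    obtain ⟨hpos, hst⟩ := h2
    rw [if_pos hin,
        if_pos (by simp only [bne_iff_ne, ne_eq]; omega :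
          ((s.toList.foldl slStep ([], 0)).2 != 0) = true)]
    rw [List.map_append, ← h1]
    simp only [List.map_cons, List.map_nil, lenOf]
    congr 3
    omega
  · rw [if_neg hin] at h2 ⊢
    rw [if_neg (by simp [h2])]
    exact h1

-- ===== VERDICT (by name: the statement is the Claim_ definition above) =====
theorem count_arrangements_spec : Claim_equal_count_arrangements := by
  intro s groups _
  unfold Spec_count_arrangements
  rw [A_eq, B_eq, lens_eq]
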